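-- pv_equiv track=rewrite | github.com/leehyowonzero/ForAlgorithmTest | 11_21/14698.py | calc
-- ===== SOURCE A (Python) =====
-- import heapq
--
-- def calc(arr):
-- 	q = []
-- 	for el in arr:
-- 		heapq.heappush(q,el)
-- 	ret = 1
-- 	while(len(q) > 1):
-- 		x = heapq.heappop(q)
-- 		y = heapq.heappop(q)
-- 		tmp = x*y
-- 		heapq.heappush(q, tmp)
-- 		ret = ret * tmp
-- 	return ret%(10**9 + 7)
-- ===== SOURCE B (Python) =====
-- def calc(arr):
--     q = list(arr)
--     ret = 1
--     while len(q) > 1: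
--         x = min(q)
--         q.remove(x)
--         y = min(q)
--         q.remove(y)
--         tmp = x * y
--         q.append(tmp)
--         ret = ret * tmp
--     return ret % (10**9 + 7)
-- ===== Notes on version B (the rewrite author's own statement) =====
-- stated objective: simpler
-- what changed: Replaces the binary heap (heapq push/pop with sift operations) by a plain working list with a repeated min()-scan and remove(), keeping the same greedy merge strategy.
import Mathlib
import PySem

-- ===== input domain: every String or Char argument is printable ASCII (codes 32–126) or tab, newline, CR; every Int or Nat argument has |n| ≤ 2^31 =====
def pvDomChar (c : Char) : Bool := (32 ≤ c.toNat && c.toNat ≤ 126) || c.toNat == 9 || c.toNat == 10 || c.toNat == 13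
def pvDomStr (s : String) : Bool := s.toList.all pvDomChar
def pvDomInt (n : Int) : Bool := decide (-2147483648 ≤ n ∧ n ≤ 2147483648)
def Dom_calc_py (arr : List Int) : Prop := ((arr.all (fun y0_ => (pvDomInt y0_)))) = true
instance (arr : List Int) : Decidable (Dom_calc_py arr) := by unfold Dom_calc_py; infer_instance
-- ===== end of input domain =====

-- B keeps A's greedy merge strategy but replaces the binary heap (hand-ported CPython
-- heapq) by a plain working list with a repeated min()-scan and remove(); same result,
-- simpler code. A mutates no caller-visible state (calc builds q locally).

-- ===== PORT A =====
def hget (l : List Int) (i : Nat) : Int := l.getD i 0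

-- heapq._siftdown(heap, 0, pos) with newitem the value being placed: bubble the hole
-- at pos up; the structural fuel argument only bounds the number of iterations (the
-- hole index strictly decreases, so fuel = pos is always enough), it never changes the value
def siftdownGo (fuel : Nat) (l : List Int) (pos : Nat) (newitem : Int) : List Int :=
  match fuel with
  | 0 => l.set pos newitem
  | fuel+1 =>
    if 0 < pos then
      if newitem < hget l ((pos - 1) / 2) then
        siftdownGo fuel (l.set pos (hget l ((pos - 1) / 2))) ((pos - 1) / 2) newitem
      else
        l.set pos newitem
    else
      l.set pos newitem

def siftdownA (l : List Int) (pos : Nat) (newitem : Int) : List Int :=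
  siftdownGo pos l pos newitem

-- heapq._siftup(heap, 0): move the hole down to a leaf (choosing the smaller child),
-- then bubble back up with _siftdown
-- again fuel only bounds the iteration count (the hole index strictly increases,
-- so fuel = l.length - pos is always enough)
def siftupGo (fuel : Nat) (l : List Int) (pos : Nat) (newitem : Int) : List Int :=
  match fuel with
  | 0 => siftdownA l pos newitem
  | fuel+1 =>
    if 2*pos+1 < l.length then
      if 2*pos+2 < l.length ∧ ¬ (hget l (2*pos+1) < hget l (2*pos+2)) then
        siftupGo fuel (l.set pos (hget l (2*pos+2))) (2*pos+2) newitem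
      else
        siftupGo fuel (l.set pos (hget l (2*pos+1))) (2*pos+1) newitem
    else
      siftdownA l pos newitem

def siftupA (l : List Int) (pos : Nat) (newitem : Int) : List Int :=
  siftupGo (l.length - pos) l pos newitem

def heappushA (heap : List Int) (item : Int) : List Int :=
  siftdownA (heap ++ [item]) heap.length item

def heappopA (heap : List Int) : Int × List Int :=
  let lastelt := heap.getLastD 0
  let rest := heap.dropLast
  if rest.isEmpty then (lastelt, rest)
  else (hget rest 0, siftupA (rest.set 0 lastelt) 0 lastelt)

-- the while loop of calc (heap version); fuel = q.length bounds the iteration count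
-- (each iteration shrinks the heap by one), it never changes the computed value
def loopAGo (fuel : Nat) (q : List Int) (ret : Int) : Int :=
  match fuel with
  | 0 => PySem.Int.mod ret (10^9 + 7)
  | fuel+1 =>
    if 1 < q.length then
      let p1 := heappopA q
      let p2 := heappopA p1.2
      let tmp := p1.1 * p2.1
      loopAGo fuel (heappushA p2.2 tmp) (ret * tmp)
    else
      PySem.Int.mod ret (10^9 + 7)

def loopA (q : List Int) (ret : Int) : Int :=
  loopAGo q.length q ret

def calc_py (arr : List Int) : Int :=
  loopA (arr.foldl (fun q el => heappushA q el) []) 1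

-- ===== PORT B =====

-- the while loop of B (working list; min() and remove()); min()/remove() cannot fail
-- under the guard (q nonempty, the removed value is min(q) ∈ q), so the `none` arms are
-- unreachable; fuel = q.length bounds the iteration count, it never changes the value
def loopBGo (fuel : Nat) (q : List Int) (ret : Int) : Int :=
  match fuel with
  | 0 => PySem.Int.mod ret (10^9 + 7)
  | fuel+1 =>
    if 1 < q.length then
      match PySem.List.min? q (fun v => v) with
      | none => ret
      | some x =>
        match PySem.List.remove? q x with
        | none => ret
        | some q1 =>
          match PySem.List.min? q1 (fun v => v) with
          | none => ret
          | some y =>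
            match PySem.List.remove? q1 y with
            | none => ret
            | some q2 =>
              let tmp := x * y
              loopBGo fuel (q2 ++ [tmp]) (ret * tmp)
    else
      PySem.Int.mod ret (10^9 + 7)

def loopB (q : List Int) (ret : Int) : Int :=
  loopBGo q.length q ret

def calc_py_alt (arr : List Int) : Int :=
  loopB arr 1

-- ===== PRECONDITION & SPEC =====
def Spec_calc_py (arr : List Int) (out : Int) : Prop := out = calc_py_alt arr
instance (arr : List Int) (out : Int) : Decidable (Spec_calc_py arr out) := by unfold Spec_calc_py; infer_instance

-- ===== CLAIM (what is proved, stated in full; the proofs are below) =====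
def Claim_equal_calc_py : Prop := ∀ (arr : List Int), Dom_calc_py arr → Spec_calc_py arr (calc_py arr)

-- ===== LEMMAS AND PROOFS =====

theorem siftdownGo_length (fuel : Nat) (l : List Int) (pos : Nat) (newitem : Int) :
    (siftdownGo fuel l pos newitem).length = l.length := by
  fun_induction siftdownGo fuel l pos newitem <;> simp_all [List.length_set]

theorem siftdownA_length (l : List Int) (pos : Nat) (newitem : Int) :
    (siftdownA l pos newitem).length = l.length := siftdownGo_length pos l pos newitem

theorem siftupGo_length (fuel : Nat) (l : List Int) (pos : Nat) (newitem : Int) :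
    (siftupGo fuel l pos newitem).length = l.length := by
  fun_induction siftupGo fuel l pos newitem <;>
    simp_all [List.length_set, siftdownA_length]

theorem siftupA_length (l : List Int) (pos : Nat) (newitem : Int) :
    (siftupA l pos newitem).length = l.length := siftupGo_length _ l pos newitem

theorem heappushA_length (heap : List Int) (item : Int) :
    (heappushA heap item).length = heap.length + 1 := by
  simp [heappushA, siftdownA_length]

theorem heappopA_snd_length (heap : List Int) :
    (heappopA heap).2.length = heap.length - 1 := by
  simp only [heappopA]
  split <;> simp [siftupA_length, List.length_dropLast]

theorem hget_set {l : List Int} {p : Nat} (hp : p < l.length) (v : Int) (j : Nat) :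
    hget (l.set p v) j = if p = j then v else hget l j := by
  simp only [hget, List.getD_eq_getElem?_getD, List.getElem?_set]
  split_ifs with h1 <;> simp [hp]

theorem mset_set {l : List Int} {p : Nat} (hp : p < l.length) (v : Int) :
    ((l.set p v : List Int) : Multiset Int) + {hget l p} = (l : Multiset Int) + {v} := by
  induction l generalizing p with
  | nil => simp at hp
  | cons a t ih =>
    cases p with
    | zero =>
      simp only [List.set, hget, List.getD_cons_zero, ← Multiset.cons_coe]
      rw [add_comm, add_comm _ ({v} : Multiset Int), Multiset.singleton_add,
        Multiset.singleton_add]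
      exact Multiset.cons_swap a v t
    | succ n =>
      simp only [List.set, hget, List.getD_cons_succ, ← Multiset.cons_coe, Multiset.cons_add]
      exact congrArg _ (ih (by simpa using hp))

theorem mset_set_set {l : List Int} {p c : Nat} (hp : p < l.length) (hc : c < l.length)
    (hpc : p ≠ c) (v : Int) :
    (((l.set p (hget l c)).set c v : List Int) : Multiset Int)
      = ((l.set p v : List Int) : Multiset Int) := by
  have hc' : c < (l.set p (hget l c)).length := by rwa [List.length_set]
  have E1 := mset_set hc' v
  rw [hget_set hp (hget l c) c, if_neg hpc] at E1
  have E2 := mset_set hp (hget l c)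
  have E3 := mset_set hp v
  have key : (((l.set p (hget l c)).set c v : List Int) : Multiset Int) + {hget l p} + {hget l c}
      = ((l.set p v : List Int) : Multiset Int) + {hget l p} + {hget l c} := by
    calc (((l.set p (hget l c)).set c v : List Int) : Multiset Int) + {hget l p} + {hget l c}
        = ((((l.set p (hget l c)).set c v : List Int) : Multiset Int) + {hget l c}) + {hget l p} := by abel
      _ = (((l.set p (hget l c) : List Int) : Multiset Int) + {v}) + {hget l p} := by rw [E1]
      _ = (((l.set p (hget l c) : List Int) : Multiset Int) + {hget l p}) + {v} := by abel
      _ = (((l : List Int) : Multiset Int) + {hget l c}) + {v} := by rw [E2]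
      _ = (((l : List Int) : Multiset Int) + {v}) + {hget l c} := by abel
      _ = (((l.set p v : List Int) : Multiset Int) + {hget l p}) + {hget l c} := by rw [E3]
      _ = ((l.set p v : List Int) : Multiset Int) + {hget l p} + {hget l c} := by abel
  exact add_right_cancel (add_right_cancel key)

def IsHeap (l : List Int) : Prop :=
  ∀ i, i < l.length → 0 < i → hget l ((i-1)/2) ≤ hget l i

theorem heap_root_min {l : List Int} (h : IsHeap l) :
    ∀ i, i < l.length → hget l 0 ≤ hget l i := by
  intro i
  induction i using Nat.strong_induction_on with
  | _ i ih =>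
    intro hi
    rcases Nat.eq_zero_or_pos i with h0 | h0
    · subst h0; exact le_refl _
    · exact le_trans (ih ((i-1)/2) (by omega) (by omega)) (h i hi h0)

theorem siftdownGo_spec (fuel : Nat) : ∀ (pos : Nat) (l : List Int) (newitem : Int),
    pos ≤ fuel →
    pos < l.length →
    (∀ i, i < l.length → 0 < i → i ≠ pos → hget l ((i-1)/2) ≤ hget l i) →
    (∀ i, i < l.length → 0 < i → (i-1)/2 = pos → newitem ≤ hget l i) →
    (∀ i, i < l.length → 0 < i → (i-1)/2 = pos → 0 < pos → hget l ((pos-1)/2) ≤ hget l i) →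
    ((siftdownGo fuel l pos newitem : List Int) : Multiset Int) = ((l.set pos newitem : List Int) : Multiset Int)
      ∧ IsHeap (siftdownGo fuel l pos newitem) := by
  induction fuel with
  | zero =>
    intro pos l newitem hfuel hpos hb hc hd
    have hp0 : pos = 0 := by omega
    subst hp0
    simp only [siftdownGo]
    refine ⟨trivial, ?_⟩
    intro i hi h0
    rw [List.length_set] at hi
    rw [hget_set hpos newitem, hget_set hpos newitem]
    split_ifs with ha hb1 hb2
    · omega
    · exact hc i hi h0 ha.symm
    · omega
    · exact hb i hi h0 (by omega)
  | succ fuel IH =>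
  intro pos l newitem hfuel hpos hb hc hd
  simp only [siftdownGo]
  split_ifs with h1 h2
  · -- recursive: 0 < pos, newitem < parent
    set pp := (pos - 1) / 2 with hpp
    set parent := hget l pp with hparent
    have hpplt : pp < pos := by omega
    have hppne : pp ≠ pos := by omega
    have hpplen : pp < l.length := by omega
    set l' := l.set pos parent with hl'
    have hlen' : l'.length = l.length := by simp [hl', List.length_set]
    have hget' : ∀ j, hget l' j = if pos = j then parent else hget l j := hget_set hpos parent
    have hpos' : pp < l'.length := by omega
    have hb' : ∀ i, i < l'.length → 0 < i → i ≠ pp → hget l' ((i-1)/2) ≤ hget l' i := by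
      intro i hi h0 hne
      rw [hlen'] at hi
      rw [hget' ((i-1)/2), hget' i]
      by_cases hip : i = pos
      · rw [if_pos hip.symm, if_neg (show pos ≠ (i-1)/2 by omega)]
        have hppe : (i-1)/2 = pp := by rw [hip]
        rw [hppe, ← hparent]
      · rw [if_neg (show pos ≠ i by omega)]
        by_cases hpar : (i-1)/2 = pos
        · rw [if_pos hpar.symm]
          exact hd i hi h0 hpar h1
        · rw [if_neg (show pos ≠ (i-1)/2 by omega)]
          exact hb i hi h0 hip
    have hc' : ∀ i, i < l'.length → 0 < i → (i-1)/2 = pp → newitem ≤ hget l' i := by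
      intro i hi h0 hpar
      rw [hlen'] at hi
      rw [hget' i]
      by_cases hip : i = pos
      · rw [if_pos hip.symm]; exact le_of_lt h2
      · rw [if_neg (show pos ≠ i by omega)]
        have hbi := hb i hi h0 hip
        rw [hpar, ← hparent] at hbi
        exact le_trans (le_of_lt h2) hbi
    have hd' : ∀ i, i < l'.length → 0 < i → (i-1)/2 = pp → 0 < pp → hget l' ((pp-1)/2) ≤ hget l' i := by
      intro i hi h0 hpar hpp0
      rw [hlen'] at hi
      have hstep : hget l ((pp-1)/2) ≤ parent := by
        have := hb pp hpplen hpp0 hppne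
        rw [← hparent] at this
        exact this
      rw [hget' ((pp-1)/2), if_neg (show pos ≠ (pp-1)/2 by omega), hget' i]
      by_cases hip : i = pos
      · rw [if_pos hip.symm]; exact hstep
      · rw [if_neg (show pos ≠ i by omega)]
        refine le_trans hstep ?_
        have hbi := hb i hi h0 hip
        rwa [hpar, ← hparent] at hbi
    obtain ⟨Hm, Hh⟩ := IH pp l' newitem (by omega) hpos' hb' hc' hd'
    refine ⟨?_, Hh⟩
    rw [Hm, hl', hparent, hpp]
    exact mset_set_set hpos hpplen (by omega) newitem
  · -- stop: 0 < pos, ¬ newitem < parent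
    refine ⟨rfl, ?_⟩
    intro i hi h0
    rw [List.length_set] at hi
    rw [hget_set hpos newitem, hget_set hpos newitem]
    split_ifs with ha hb1 hb2
    · omega
    · exact hc i hi h0 ha.symm
    · rw [← hb2]; exact not_lt.mp h2
    · exact hb i hi h0 (by omega)
  · -- pos = 0
    refine ⟨rfl, ?_⟩
    intro i hi h0
    rw [List.length_set] at hi
    rw [hget_set hpos newitem, hget_set hpos newitem]
    split_ifs with ha hb1 hb2
    · omega
    · exact hc i hi h0 ha.symm
    · omega
    · exact hb i hi h0 (by omega)
theorem siftdownA_spec (pos : Nat) (l : List Int) (newitem : Int)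
    (hpos : pos < l.length)
    (hb : ∀ i, i < l.length → 0 < i → i ≠ pos → hget l ((i-1)/2) ≤ hget l i)
    (hc : ∀ i, i < l.length → 0 < i → (i-1)/2 = pos → newitem ≤ hget l i)
    (hd : ∀ i, i < l.length → 0 < i → (i-1)/2 = pos → 0 < pos → hget l ((pos-1)/2) ≤ hget l i) :
    ((siftdownA l pos newitem : List Int) : Multiset Int) = ((l.set pos newitem : List Int) : Multiset Int)
      ∧ IsHeap (siftdownA l pos newitem) :=
  siftdownGo_spec pos pos l newitem le_rfl hpos hb hc hd

theorem siftupGo_spec (fuel : Nat) : ∀ (pos : Nat) (l : List Int) (newitem : Int),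
    l.length - pos ≤ fuel →
    pos < l.length →
    (∀ i, i < l.length → 0 < i → (i-1)/2 ≠ pos → hget l ((i-1)/2) ≤ hget l i) →
    (∀ i, i < l.length → 0 < i → (i-1)/2 = pos → 0 < pos → hget l ((pos-1)/2) ≤ hget l i) →
    ((siftupGo fuel l pos newitem : List Int) : Multiset Int) = ((l.set pos newitem : List Int) : Multiset Int)
      ∧ IsHeap (siftupGo fuel l pos newitem) := by
  induction fuel with
  | zero =>
    intro pos l newitem hfuel hpos hB hD
    have h1 : ¬ 2*pos+1 < l.length := by omega
    simp only [siftupGo]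
    refine siftdownA_spec pos l newitem hpos ?_ ?_ ?_
    · intro i hi h0 hne
      exact hB i hi h0 (by omega)
    · intro i hi h0 hpar
      omega
    · intro i hi h0 hpar _
      omega
  | succ fuel IH =>
  intro pos l newitem hfuel hpos hB hD
  have step : ∀ c : Nat, pos < c → (c-1)/2 = pos → c < l.length →
      (∀ s, (s-1)/2 = pos → s < l.length → 0 < s → hget l c ≤ hget l s) →
      ((siftupGo fuel (l.set pos (hget l c)) c newitem : List Int) : Multiset Int)
          = ((l.set pos newitem : List Int) : Multiset Int)
        ∧ IsHeap (siftupGo fuel (l.set pos (hget l c)) c newitem) := by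
    intro c hcgt hcpar hclen hmin
    set l' := l.set pos (hget l c) with hl'
    have hlen' : l'.length = l.length := by rw [hl', List.length_set]
    have hget' : ∀ j, hget l' j = if pos = j then hget l c else hget l j :=
      hget_set hpos (hget l c)
    have hB' : ∀ i, i < l'.length → 0 < i → (i-1)/2 ≠ c → hget l' ((i-1)/2) ≤ hget l' i := by
      intro i hi h0 hne
      rw [hlen'] at hi
      rw [hget' ((i-1)/2), hget' i]
      by_cases hip : i = pos
      · rw [if_pos hip.symm, if_neg (show pos ≠ (i-1)/2 by omega)]
        have := hD c hclen (by omega) hcpar (by omega)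
        subst hip
        exact this
      · rw [if_neg (show pos ≠ i by omega)]
        by_cases hpar : (i-1)/2 = pos
        · rw [if_pos hpar.symm]
          exact hmin i hpar hi h0
        · rw [if_neg (by omega)]
          exact hB i hi h0 hpar
    have hD' : ∀ i, i < l'.length → 0 < i → (i-1)/2 = c → 0 < c → hget l' ((c-1)/2) ≤ hget l' i := by
      intro i hi h0 hpar _
      rw [hlen'] at hi
      have hipos : i ≠ pos := by omega
      rw [hget' ((c-1)/2), hcpar, if_pos rfl, hget' i, if_neg (show pos ≠ i by omega)]
      have := hB i hi h0 (by omega)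
      rwa [hpar] at this
    obtain ⟨Hm, Hh⟩ := IH c l' newitem (by rw [hlen']; omega) (by omega) hB' hD'
    refine ⟨?_, Hh⟩
    rw [Hm, hl']
    exact mset_set_set hpos hclen (by omega) newitem
  simp only [siftupGo]
  split_ifs with h1 h2
  · refine step (2*pos+2) ?_ ?_ h2.1 ?_
    · omega
    · omega
    · intro s hs hslen hs0
      have hs' : s = 2*pos+1 ∨ s = 2*pos+2 := by omega
      rcases hs' with h | h
      · subst h; exact not_lt.mp h2.2
      · subst h; exact le_refl _
  · refine step (2*pos+1) ?_ ?_ h1 ?_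
    · omega
    · omega
    · intro s hs hslen hs0
      have hs' : s = 2*pos+1 ∨ s = 2*pos+2 := by omega
      rcases hs' with h | h
      · subst h; exact le_refl _
      · subst h
        rcases not_and_or.mp h2 with h3 | h3
        · omega
        · exact le_of_lt (not_not.mp h3)
  · refine siftdownA_spec pos l newitem hpos ?_ ?_ ?_
    · intro i hi h0 hne
      exact hB i hi h0 (by omega)
    · intro i hi h0 hpar
      omega
    · intro i hi h0 hpar _
      omega
theorem siftupA_spec (n : Nat) (pos : Nat) (l : List Int) (newitem : Int)
    (hn : l.length - pos = n)
    (hpos : pos < l.length)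
    (hB : ∀ i, i < l.length → 0 < i → (i-1)/2 ≠ pos → hget l ((i-1)/2) ≤ hget l i)
    (hD : ∀ i, i < l.length → 0 < i → (i-1)/2 = pos → 0 < pos → hget l ((pos-1)/2) ≤ hget l i) :
    ((siftupA l pos newitem : List Int) : Multiset Int) = ((l.set pos newitem : List Int) : Multiset Int)
      ∧ IsHeap (siftupA l pos newitem) :=
  siftupGo_spec (l.length - pos) pos l newitem le_rfl hpos hB hD

theorem hget_append {l : List Int} {j : Nat} (h : j < l.length) (x : Int) :
    hget (l ++ [x]) j = hget l j := by
  simp [hget, List.getD_eq_getElem?_getD, List.getElem?_append_left h]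

theorem hget_last (l : List Int) (x : Int) : hget (l ++ [x]) l.length = x := by
  simp [hget, List.getD_eq_getElem?_getD, List.getElem?_append_right]

theorem heappushA_spec {heap : List Int} (h : IsHeap heap) (item : Int) :
    ((heappushA heap item : List Int) : Multiset Int) = item ::ₘ (heap : Multiset Int)
      ∧ IsHeap (heappushA heap item) := by
  have hpos : heap.length < (heap ++ [item]).length := by simp
  obtain ⟨Hm, Hh⟩ := siftdownA_spec heap.length (heap ++ [item]) item hpos
    (by
      intro i hi h0 hne
      simp only [List.length_append, List.length_cons, List.length_nil] at hi
      have hil : i < heap.length := by omega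
      rw [hget_append hil, hget_append (by omega)]
      exact h i hil h0)
    (by intro i hi h0 hpar; simp at hi; omega)
    (by intro i hi h0 hpar _; simp at hi; omega)
  refine ⟨?_, Hh⟩
  unfold heappushA
  rw [Hm]
  have E := mset_set (l := heap ++ [item]) (p := heap.length) hpos item
  rw [hget_last] at E
  have := add_right_cancel E
  rw [this]
  simp [Multiset.singleton_add]

theorem heappopA_spec {heap : List Int} (hne : heap ≠ []) (h : IsHeap heap) :
    (heap : Multiset Int) = (heappopA heap).1 ::ₘ ((heappopA heap).2 : Multiset Int)
      ∧ IsHeap (heappopA heap).2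
      ∧ (heappopA heap).1 ∈ heap
      ∧ (∀ z ∈ heap, (heappopA heap).1 ≤ z) := by
  have hdec : heap.dropLast ++ [heap.getLast hne] = heap := List.dropLast_concat_getLast hne
  by_cases hre : heap.dropLast.isEmpty
  · -- heap = [a]
    have hlen1 : heap.length = 1 := by
      have := List.isEmpty_iff.mp hre
      have h2 := congrArg List.length hdec
      simp [this] at h2
      omega
    obtain ⟨a, rfl⟩ := List.length_eq_one_iff.mp hlen1
    simp [heappopA, IsHeap, hget]
  · -- heap.length ≥ 2
    have hrl : heap.dropLast.length = heap.length - 1 := by simp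
    have hlen2 : 2 ≤ heap.length := by
      rcases Nat.lt_or_ge heap.length 2 with hl | hl
      · exfalso
        interval_cases hh : heap.length
        · exact hne (List.length_eq_zero_iff.mp hh)
        · exact hre (by simp [List.isEmpty_iff, List.length_eq_zero_iff.mp (by simp [hh] : heap.dropLast.length = 0)])
      · exact hl
    have hr0 : 0 < heap.dropLast.length := by omega
    set le := heap.getLastD 0 with hle
    set rest := heap.dropLast with hrest
    have hgr : ∀ j, j < rest.length → hget rest j = hget heap j := by
      intro j hj
      conv_rhs => rw [← hdec]
      rw [hget_append hj]
    have hl0 : (rest.set 0 le).length = rest.length := by simp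
    obtain ⟨Hm, Hh⟩ := siftupA_spec ((rest.set 0 le).length - 0) 0 (rest.set 0 le) le rfl
      (by omega)
      (by
        intro i hi h0 hpar
        rw [hl0] at hi
        rw [hget_set (by omega) le ((i-1)/2), if_neg (by omega),
          hget_set (by omega) le i, if_neg (by omega)]
        rw [hgr ((i-1)/2) (by omega), hgr i hi]
        exact h i (by omega) h0)
      (by intro i hi h0 hpar hpar0; omega)
    have hres : heappopA heap = (hget rest 0, siftupA (rest.set 0 le) 0 le) := by
      rw [heappopA]
      simp only [← hle, ← hrest]
      rw [if_neg (by simp [hre])]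
    rw [hres]
    have hx0 : hget rest 0 = hget heap 0 := hgr 0 hr0
    have E := mset_set (l := rest) (p := 0) hr0 le
    have hmain : (heap : Multiset Int) = hget rest 0 ::ₘ ((siftupA (rest.set 0 le) 0 le : List Int) : Multiset Int) := by
      rw [Hm, List.set_set]
      rw [← Multiset.singleton_add]
      conv_lhs => rw [← hdec]
      have hcoe : ((heap.dropLast ++ [heap.getLast hne] : List Int) : Multiset Int)
          = (rest : Multiset Int) + {heap.getLast hne} := by
        rw [← hrest, ← Multiset.coe_singleton, ← Multiset.coe_add]
      rw [hcoe]
      have hlast : heap.getLast hne = le := by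
        rw [hle, List.getLastD_eq_getLast?, List.getLast?_eq_some_getLast hne]
        rfl
      rw [hlast, ← E]
      exact add_comm _ _
    refine ⟨hmain, Hh, ?_, ?_⟩
    · rw [hx0]
      have h0lt : 0 < heap.length := by omega
      have hh : hget heap 0 = heap[0] := List.getD_eq_getElem heap 0 h0lt
      rw [hh]
      exact List.getElem_mem _
    · intro z hz
      obtain ⟨i, hi, rfl⟩ := List.mem_iff_getElem.mp hz
      rw [hx0]
      have h2 : hget heap i = heap[i] := List.getD_eq_getElem heap 0 hi
      rw [← h2]
      exact heap_root_min h i hi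
theorem loop_eq (fuel : Nat) : ∀ (qA qB : List Int) (ret : Int),
    qA.length ≤ fuel → IsHeap qA → (qA : Multiset Int) = (qB : Multiset Int) →
    loopAGo fuel qA ret = loopBGo fuel qB ret := by
  induction fuel with
  | zero => intro qA qB ret _ _ _; simp only [loopAGo, loopBGo]
  | succ fuel IH =>
  intro qA qB ret hfuel hheap hms
  have hcard : qA.length = qB.length := by
    have := congrArg Multiset.card hms
    simpa using this
  by_cases hq : 1 < qA.length
  · have hneA : qA ≠ [] := by
      intro hh; rw [hh] at hq; simp at hq
    obtain ⟨HA1, HA2, HA3, HA4⟩ := heappopA_spec hneA hheap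
    have hlen1 : (heappopA qA).2.length = qA.length - 1 := heappopA_snd_length qA
    have hneA2 : (heappopA qA).2 ≠ [] := by
      intro hh
      rw [hh] at hlen1
      simp at hlen1
      omega
    obtain ⟨HB1, HB2, HB3, HB4⟩ := heappopA_spec hneA2 HA2
    have hlen2 : (heappopA (heappopA qA).2).2.length = qA.length - 2 := by
      rw [heappopA_snd_length, hlen1]; omega
    set x := (heappopA qA).1 with hx
    set y := (heappopA (heappopA qA).2).1 with hy
    set tmp := x * y with htmp
    obtain ⟨HP1, HP2⟩ := heappushA_spec HB2 tmp
    -- B side values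
    have hqBne : qB ≠ [] := by
      intro hh
      rw [hh] at hcard
      simp only [List.length_nil] at hcard
      omega
    obtain ⟨m, hm⟩ : ∃ m, PySem.List.min? qB (fun v => v) = some m := by
      cases hmm : PySem.List.min? qB (fun v => v) with
      | none => exact absurd ((PySem.List.min?_eq_none_iff qB _).mp hmm) hqBne
      | some m => exact ⟨m, rfl⟩
    have hmqB : m ∈ qB := PySem.List.min?_mem hm
    have hmmin : ∀ z ∈ qB, m ≤ z := PySem.List.min?_isMin hm
    have hmemAB : ∀ z : Int, z ∈ qA ↔ z ∈ qB := by
      intro z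
      constructor <;> intro hz
      · have : z ∈ (qB : Multiset Int) := by rw [← hms]; exact hz
        exact this
      · have : z ∈ (qA : Multiset Int) := by rw [hms]; exact hz
        exact this
    have hxm : m = x := by
      refine le_antisymm (hmmin x ((hmemAB x).mp HA3)) (HA4 m ((hmemAB m).mpr hmqB))
    have hrm1 : PySem.List.remove? qB m = some (qB.erase m) :=
      PySem.List.remove?_eq_some_erase qB m hmqB
    have hq1ms : ((qB.erase m : List Int) : Multiset Int) = ((heappopA qA).2 : Multiset Int) := by
      rw [← Multiset.coe_erase, ← hms, HA1, hxm, Multiset.erase_cons_head]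
    -- second min
    have hq1card : (qB.erase m).length = (heappopA qA).2.length := by
      have := congrArg Multiset.card hq1ms
      simpa using this
    have hq1ne : qB.erase m ≠ [] := by
      intro hh; rw [hh] at hq1card; simp at hq1card
      exact hneA2 (List.length_eq_zero_iff.mp hq1card.symm)
    obtain ⟨m2, hm2⟩ : ∃ m2, PySem.List.min? (qB.erase m) (fun v => v) = some m2 := by
      cases hmm : PySem.List.min? (qB.erase m) (fun v => v) with
      | none => exact absurd ((PySem.List.min?_eq_none_iff _ _).mp hmm) hq1ne
      | some m2 => exact ⟨m2, rfl⟩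
    have hmem2 : ∀ z : Int, z ∈ (heappopA qA).2 ↔ z ∈ qB.erase m := by
      intro z
      constructor <;> intro hz
      · have : z ∈ ((qB.erase m : List Int) : Multiset Int) := by rw [hq1ms]; exact hz
        exact this
      · have : z ∈ (((heappopA qA).2 : List Int) : Multiset Int) := by rw [← hq1ms]; exact hz
        exact this
    have hym : m2 = y := by
      refine le_antisymm (PySem.List.min?_isMin hm2 y ((hmem2 y).mp HB3))
        (HB4 m2 ((hmem2 m2).mpr (PySem.List.min?_mem hm2)))
    have hrm2 : PySem.List.remove? (qB.erase m) m2 = some ((qB.erase m).erase m2) :=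
      PySem.List.remove?_eq_some_erase _ m2 (PySem.List.min?_mem hm2)
    have hq2ms : (((qB.erase m).erase m2 : List Int) : Multiset Int)
        = ((heappopA (heappopA qA).2).2 : Multiset Int) := by
      rw [← Multiset.coe_erase, hq1ms, HB1, hym, Multiset.erase_cons_head]
    -- unfold both loops one step
    subst hxm
    subst hym
    simp only [loopAGo, loopBGo]
    rw [if_pos hq, if_pos (by omega : 1 < qB.length)]
    simp only [hm]
    split
    next heq => rw [hrm1] at heq; cases heq
    next q1 heq =>
      rw [hrm1] at heq
      injection heq with heq
      subst heq
      simp only [hm2]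
      split
      next heq2 => rw [hrm2] at heq2; cases heq2
      next q2 heq2 =>
        rw [hrm2] at heq2
        injection heq2 with heq2
        subst heq2
        refine IH _ _ _ (by rw [heappushA_length, hlen2]; omega) HP2 ?_
        have hsplit : ((((qB.erase x).erase y ++ [x*y] : List Int)) : Multiset Int)
            = (((qB.erase x).erase y : List Int) : Multiset Int) + {x*y} := by
          rw [← Multiset.coe_singleton, ← Multiset.coe_add]
        rw [HP1, hsplit, hq2ms, ← Multiset.singleton_add]
        exact add_comm _ _
  · simp only [loopAGo, loopBGo]
    rw [if_neg hq, if_neg (by omega : ¬ 1 < qB.length)]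
theorem build_spec (arr : List Int) : ∀ (q : List Int), IsHeap q →
    ((arr.foldl (fun q el => heappushA q el) q : List Int) : Multiset Int)
        = (q : Multiset Int) + (arr : Multiset Int)
      ∧ IsHeap (arr.foldl (fun q el => heappushA q el) q) := by
  induction arr with
  | nil => intro q hq; simpa using hq
  | cons a t ih =>
    intro q hq
    obtain ⟨hm, hh⟩ := heappushA_spec hq a
    obtain ⟨hm2, hh2⟩ := ih (heappushA q a) hh
    refine ⟨?_, by simpa using hh2⟩
    simp only [List.foldl_cons] at *
    rw [hm2, hm, ← Multiset.cons_coe]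
    rw [← Multiset.singleton_add, ← Multiset.singleton_add]
    abel

-- ===== VERDICT (by name: the statement is the Claim_ definition above) =====
theorem calc_py_spec : Claim_equal_calc_py := by
  intro arr _
  unfold Spec_calc_py calc_py calc_py_alt loopA loopB
  obtain ⟨hm, hh⟩ := build_spec arr [] (by intro i hi; simp at hi)
  have hcard : (arr.foldl (fun q el => heappushA q el) []).length = arr.length := by
    have := congrArg Multiset.card hm
    simpa using this
  rw [hcard]
  exact loop_eq arr.length _ _ 1 (by omega) hh (by simpa using hm)
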